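-- pv_equiv track=rewrite | github.com/pabloschwarzenberg/grader | hito2_ej3/hito2_ej3_70edeeda8bc9dd68e73f6f17d2679560.py | obtener_subsecuencias_unicas
-- ===== SOURCE A (Python) =====
-- def obtener_subsecuencias_unicas(secuencia, n):
--     subsecuencias = set()
--     subsecuencias_repetidas = set()
--
--     # Obtener todas las subsecuencias de largo n
--     for i in range(len(secuencia) - n + 1):
--         subsecuencia = secuencia[i:i+n]
--         if subsecuencia in subsecuencias:
--             subsecuencias_repetidas.add(subsecuencia)
--         else:
--             subsecuencias.add(subsecuencia)
--
--     # Filtrar las subsecuencias que aparecen una única vez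
--     subsecuencias_unicas = subsecuencias - subsecuencias_repetidas
--
--     return subsecuencias_unicas
-- ===== SOURCE B (Python) =====
-- def obtener_subsecuencias_unicas(secuencia, n):
--     # Sort-then-scan: sort all length-n windows, a window is unique iff it differs
--     # from both sorted neighbours; collect the unique ones in order of appearance.
--     ventanas = [secuencia[i:i+n] for i in range(len(secuencia) - n + 1)]
--     orden = sorted(ventanas)
--     m = len(orden)
--     solitarias = {orden[j] for j in range(m)
--                   if (j == 0 or orden[j-1] != orden[j]) and (j == m - 1 or orden[j] != orden[j+1])}
--     return {v for v in ventanas if v in solitarias}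
-- ===== Notes on version B (the rewrite author's own statement) =====
-- stated objective: alternative
-- what changed: Replaces A's stateful streaming pass with seen/repeated sets, branching and a final set difference by a sort-then-scan algorithm: sort the list of all length-n windows, mark as unique the positions that differ from both sorted neighbours, and collect those windows in order of appearance.
import Mathlib
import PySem

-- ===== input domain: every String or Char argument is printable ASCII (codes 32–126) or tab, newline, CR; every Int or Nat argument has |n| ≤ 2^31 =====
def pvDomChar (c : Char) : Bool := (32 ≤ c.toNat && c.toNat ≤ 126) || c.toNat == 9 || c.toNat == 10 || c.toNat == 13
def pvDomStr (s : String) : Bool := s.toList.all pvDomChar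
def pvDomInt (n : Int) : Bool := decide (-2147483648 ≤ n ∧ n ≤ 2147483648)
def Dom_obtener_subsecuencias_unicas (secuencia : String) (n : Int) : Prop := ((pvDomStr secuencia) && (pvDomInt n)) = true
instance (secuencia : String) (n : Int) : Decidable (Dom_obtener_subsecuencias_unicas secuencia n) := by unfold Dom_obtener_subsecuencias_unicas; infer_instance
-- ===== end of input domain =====

-- B replaces A's stateful seen/repeated two-set streaming pass and final set difference by a
-- sort-then-scan algorithm: sort the window list, keep positions differing from both sorted
-- neighbours, and collect those windows in order of appearance (objective: alternative).


-- ===== PORT A =====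
-- A's loop body: if the slice was already seen, add it to the repeated set, else to the seen set.
def pvStepA (p : PySem.Set String × PySem.Set String) (subsecuencia : String) :
    PySem.Set String × PySem.Set String :=
  if PySem.Set.contains p.1 subsecuencia then (p.1, PySem.Set.add p.2 subsecuencia)
  else (PySem.Set.add p.1 subsecuencia, p.2)

def obtener_subsecuencias_unicas (secuencia : String) (n : Int) : List String :=
  let st := (PySem.List.pyRange 0 (PySem.Str.len secuencia - n + 1) 1).foldl
    (fun p i => pvStepA p (PySem.Str.slice secuencia (some i) (some (i + n))))
    (PySem.Set.empty, PySem.Set.empty)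
  PySem.Set.diff st.1 st.2

-- ===== PORT B =====
-- B's comprehension guard: position j of the sorted list differs from both neighbours.
def pvCond (orden : List String) (m : Int) (j : Int) : Bool :=
  (j == 0 || !(PySem.List.pyGetD orden (j-1) "" == PySem.List.pyGetD orden j ""))
  && (j == m - 1 || !(PySem.List.pyGetD orden j "" == PySem.List.pyGetD orden (j+1) ""))

def obtener_subsecuencias_unicas_alt (secuencia : String) (n : Int) : List String :=
  let ventanas := (PySem.List.pyRange 0 (PySem.Str.len secuencia - n + 1) 1).map
    (fun i => PySem.Str.slice secuencia (some i) (some (i + n)))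
  -- Python's sorted(ventanas): ported as Lean's stable mergeSort under ≤ (same value on String lists).
  let orden := ventanas.mergeSort (fun a b => a ≤ b)
  let m : Int := orden.length
  let solitarias := PySem.Set.ofList
    (((PySem.List.pyRange 0 m 1).filter (fun j => pvCond orden m j)).map
      (fun j => PySem.List.pyGetD orden j ""))
  PySem.Set.ofList (ventanas.filter (fun v => PySem.Set.contains solitarias v))

-- ===== PRECONDITION & SPEC =====
def Spec_obtener_subsecuencias_unicas (secuencia : String) (n : Int) (out : List String) : Prop := out = obtener_subsecuencias_unicas_alt secuencia n
instance (secuencia : String) (n : Int) (out : List String) : Decidable (Spec_obtener_subsecuencias_unicas secuencia n out) := by unfold Spec_obtener_subsecuencias_unicas; infer_instance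

-- ===== CLAIM (what is proved, stated in full; the proofs are below) =====
def Claim_equal_obtener_subsecuencias_unicas : Prop := ∀ (secuencia : String) (n : Int), Dom_obtener_subsecuencias_unicas secuencia n → Spec_obtener_subsecuencias_unicas secuencia n (obtener_subsecuencias_unicas secuencia n)

-- ===== LEMMAS AND PROOFS =====

lemma pv_loopA_fst (xs : List String) (s r : PySem.Set String) :
    (xs.foldl pvStepA (s, r)).1 = xs.foldl PySem.Set.add s := by
  induction xs generalizing s r with
  | nil => rfl
  | cons x t ih =>
    simp only [List.foldl_cons, pvStepA]
    split_ifs with h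
    · rw [ih]
      have hx : x ∈ s := by simpa [PySem.Set.contains] using h
      have hadd : PySem.Set.add s x = s := by simp [PySem.Set.add, PySem.Set.contains, hx]
      rw [hadd]
    · rw [ih]

lemma pv_loopA_snd_mem (xs : List String) (s r : PySem.Set String) (y : String) :
    y ∈ (xs.foldl pvStepA (s, r)).2 ↔ y ∈ r ∨ (y ∈ s ∧ y ∈ xs) ∨ 2 ≤ xs.count y := by
  induction xs generalizing s r with
  | nil => simp
  | cons x t ih =>
    simp only [List.foldl_cons, pvStepA]
    by_cases hx : x ∈ s
    · rw [if_pos (by simp [PySem.Set.contains, hx])]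
      rw [ih]
      by_cases hyx : y = x
      · subst hyx
        simp [PySem.Set.mem_add, hx]
      · have hxy : ¬ x = y := fun h => hyx h.symm
        simp only [PySem.Set.mem_add, List.count_cons, beq_iff_eq, hxy, if_false, add_zero,
          List.mem_cons, hyx, false_or]
        tauto
    · rw [if_neg (by simp [PySem.Set.contains, hx])]
      rw [ih]
      by_cases hyx : y = x
      · subst hyx
        have hct := List.count_pos_iff (a := y) (l := t)
        simp [hx]
        constructor
        · rintro (hr | hyt | hcc)
          exacts [Or.inl hr, Or.inr hyt, Or.inr (hct.mp (by omega))]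
        · rintro (hr | hyt)
          exacts [Or.inl hr, Or.inr (Or.inl hyt)]
      · have hxy : ¬ x = y := fun h => hyx h.symm
        simp only [PySem.Set.mem_add, List.count_cons, beq_iff_eq, hxy, if_false, add_zero,
          List.mem_cons, hyx, false_or]
        tauto

-- A's two-set loop + set difference = the count-1 windows, filtered out of the deduped windows.
lemma pv_A_side (xs : List String) :
    PySem.Set.diff (xs.foldl pvStepA (PySem.Set.empty, PySem.Set.empty)).1
      (xs.foldl pvStepA (PySem.Set.empty, PySem.Set.empty)).2
      = (PySem.Set.ofList xs).filter (fun v => xs.count v == 1) := by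
  show ((xs.foldl pvStepA (PySem.Set.empty, PySem.Set.empty)).1).filter
      (fun y => !(PySem.Set.contains (xs.foldl pvStepA (PySem.Set.empty, PySem.Set.empty)).2 y)) = _
  rw [pv_loopA_fst]
  have hof : List.foldl PySem.Set.add PySem.Set.empty xs = PySem.Set.ofList xs := rfl
  rw [hof]
  apply List.filter_congr
  intro y hy
  have hyxs : y ∈ xs := (PySem.Set.mem_ofList xs y).mp hy
  have h1 : 0 < xs.count y := List.count_pos_iff.mpr hyxs
  rcases Nat.lt_or_ge (xs.count y) 2 with h2 | h2
  · have hc1 : xs.count y = 1 := by omega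
    have hcon : PySem.Set.contains ((xs.foldl pvStepA (PySem.Set.empty, PySem.Set.empty)).2) y = false := by
      simp [PySem.Set.contains, pv_loopA_snd_mem, PySem.Set.empty, hc1]
    rw [hcon]
    simp [hc1]
  · have hcon : PySem.Set.contains ((xs.foldl pvStepA (PySem.Set.empty, PySem.Set.empty)).2) y = true := by
      simp [PySem.Set.contains, pv_loopA_snd_mem, PySem.Set.empty]
      omega
    rw [hcon]
    have : ¬ (xs.count y = 1) := by omega
    simp [this]

-- Filtering by a predicate that only holds on count-≤-1 elements commutes with ofList (dedup).
lemma pv_filter_ofList (l : List String) (p : String → Bool)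
    (h : ∀ a, p a = true → l.count a ≤ 1) :
    (PySem.Set.ofList l).filter p = l.filter p := by
  induction l with
  | nil => simp
  | cons x t ih =>
    rw [PySem.Set.ofList_cons]
    by_cases hpx : p x = true
    · have hx : x ∉ t := fun hm => by
        have h1 := h x hpx
        have h2 := List.count_pos_iff.mpr hm
        rw [List.count_cons_self] at h1
        omega
      have hdis : PySem.Set.discard (PySem.Set.ofList t) x = PySem.Set.ofList t := by
        apply List.filter_eq_self.mpr
        intro a ha
        have hat : a ∈ t := (PySem.Set.mem_ofList t a).mp ha
        have : a ≠ x := fun e => hx (e ▸ hat)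
        simp [this]
      rw [List.filter_cons, if_pos hpx, hdis,
        ih (fun a ha => le_trans ((List.sublist_cons_self x t).count_le a) (h a ha)),
        List.filter_cons, if_pos hpx]
    · have hpx' : p x = false := by simpa using hpx
      rw [List.filter_cons, if_neg (by simp [hpx']), List.filter_cons, if_neg (by simp [hpx'])]
      rw [← ih (fun a ha => le_trans ((List.sublist_cons_self x t).count_le a) (h a ha))]
      show ((PySem.Set.ofList t).filter _).filter p = _
      rw [List.filter_filter]
      apply List.filter_congr
      intro a _
      by_cases hax : a = x
      · subst hax; simp [hpx']
      · simp [hax]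

-- In a ≤-sorted list, position j differs from both neighbours iff its value occurs exactly once.
lemma pv_sorted_count_one (l : List String) (hs : l.Pairwise (· ≤ ·)) (j : ℕ) (hj : j < l.length) :
    ((j = 0 ∨ l.getD (j-1) "" ≠ l.getD j "") ∧ (j = l.length - 1 ∨ l.getD j "" ≠ l.getD (j+1) ""))
      ↔ l.count l[j] = 1 := by
  have hmono := List.pairwise_iff_getElem.mp hs
  rw [List.getD_eq_getElem l "" hj]
  constructor
  · rintro ⟨h1, h2⟩
    have hc1 : 0 < l.count l[j] := List.count_pos_iff.mpr (List.getElem_mem hj)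
    by_contra hne
    have hc2 : 2 ≤ l.count l[j] := by omega
    obtain ⟨is, his, hpw⟩ := List.sublist_eq_map_getElem
      (List.duplicate_iff_sublist.mp (List.duplicate_iff_two_le_count.mpr hc2))
    obtain ⟨p, q, rfl⟩ : ∃ p q, is = [p, q] := by
      rcases is with _ | ⟨p, t⟩
      · simp at his
      rcases t with _ | ⟨q, t⟩
      · simp at his
      rcases t with _ | ⟨r, t⟩
      · exact ⟨p, q, rfl⟩
      · simp at his
    · have hpq : (p : ℕ) < (q : ℕ) := by
        have := List.pairwise_cons.mp hpw
        exact this.1 q (by simp)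
      have hlp : l[(p : ℕ)] = l[j] := by simpa using congrArg (fun t => t.getD 0 "") his.symm
      have hlq : l[(q : ℕ)] = l[j] := by simpa using congrArg (fun t => t.getD 1 "") his.symm
      -- pick a second index k ≠ j carrying the same value
      obtain ⟨k, hk, hkj, hlk⟩ : ∃ k, ∃ _ : k < l.length, k ≠ j ∧ l[k] = l[j] := by
        by_cases hpj : (p : ℕ) = j
        · exact ⟨q, q.isLt, by omega, hlq⟩
        · exact ⟨p, p.isLt, hpj, hlp⟩
      rcases Nat.lt_or_ge k j with hkj' | hkj'
      · -- k < j : the left neighbour equals l[j]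
        have hj0 : j ≠ 0 := by omega
        have hne1 := h1.resolve_left hj0
        rw [List.getD_eq_getElem l "" (by omega : j-1 < l.length)] at hne1
        have hle1 : l[k] ≤ l[j-1] := by
          rcases Nat.lt_or_ge k (j-1) with h | h
          · exact hmono k (j-1) hk (by omega) h
          · have : k = j - 1 := by omega
            subst this; exact le_refl _
        have hle2 : l[j-1] ≤ l[j] := hmono (j-1) j (by omega) hj (by omega)
        exact hne1 (le_antisymm hle2 (hlk ▸ hle1))
      · -- k > j : the right neighbour equals l[j]
        have hkj'' : j < k := by omega
        have hjlast : j ≠ l.length - 1 := by omega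
        have hne2 := h2.resolve_left hjlast
        rw [List.getD_eq_getElem l "" (by omega : j+1 < l.length)] at hne2
        have hle1 : l[j] ≤ l[j+1] := hmono j (j+1) hj (by omega) (by omega)
        have hle2 : l[j+1] ≤ l[k] := by
          rcases Nat.lt_or_ge (j+1) k with h | h
          · exact hmono (j+1) k (by omega) hk h
          · have : j + 1 = k := by omega
            subst this; exact le_refl _
        exact hne2 (le_antisymm hle1 (by rw [← hlk]; exact hle2))
  · intro hcount
    constructor
    · by_cases hj0 : j = 0
      · exact Or.inl hj0
      · right
        rw [List.getD_eq_getElem l "" (by omega : j-1 < l.length)]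
        intro heq
        have hsub : [l[j], l[j]].Sublist l := by
          have := List.map_getElem_sublist (l := l)
            (is := [⟨j-1, by omega⟩, ⟨j, hj⟩]) (by simp [List.pairwise_cons, Fin.mk_lt_mk]; omega)
          simpa [heq] using this
        have := List.duplicate_iff_two_le_count.mp (List.duplicate_iff_sublist.mpr hsub)
        omega
    · by_cases hjl : j = l.length - 1
      · exact Or.inl hjl
      · right
        rw [List.getD_eq_getElem l "" (by omega : j+1 < l.length)]
        intro heq
        have hsub : [l[j], l[j]].Sublist l := by
          have := List.map_getElem_sublist (l := l)
            (is := [⟨j, hj⟩, ⟨j+1, by omega⟩]) (by simp [List.pairwise_cons, Fin.mk_lt_mk])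
          simpa [← heq] using this
        have := List.duplicate_iff_two_le_count.mp (List.duplicate_iff_sublist.mpr hsub)
        omega

-- The port's Bool guard at Int index ↑jn = the neighbour-difference proposition at jn.
lemma pv_cond_iff (l : List String) (jn : ℕ) (hjn : jn < l.length) :
    (pvCond l (l.length : Int) (jn : Int) = true) ↔
      ((jn = 0 ∨ l.getD (jn-1) "" ≠ l.getD jn "") ∧ (jn = l.length - 1 ∨ l.getD jn "" ≠ l.getD (jn+1) "")) := by
  unfold pvCond
  rw [Bool.and_eq_true, Bool.or_eq_true, Bool.or_eq_true]
  simp only [beq_iff_eq, Bool.not_eq_true', beq_eq_false_iff_ne]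
  apply and_congr
  · by_cases hj0 : jn = 0
    · exact iff_of_true (Or.inl (by omega)) (Or.inl hj0)
    · have hne : ¬ ((jn : Int) = 0) := by omega
      have hc : (jn : Int) - 1 = ((jn - 1 : ℕ) : Int) := by omega
      rw [hc, PySem.List.pyGetD_natCast, PySem.List.pyGetD_natCast]
      simp [hj0]
  · by_cases hjl : jn = l.length - 1
    · exact iff_of_true (Or.inl (by omega)) (Or.inl hjl)
    · have hne : ¬ ((jn : Int) = (l.length : Int) - 1) := by omega
      have hc : (jn : Int) + 1 = ((jn + 1 : ℕ) : Int) := by omega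
      rw [hc, PySem.List.pyGetD_natCast, PySem.List.pyGetD_natCast]
      simp [hne, hjl]

-- Membership in B's scanned-singles list = being a count-1 element of the sorted list.
lemma pv_scan_mem (l : List String) (hs : l.Pairwise (· ≤ ·)) (v : String) :
    (v ∈ ((PySem.List.pyRange 0 (l.length : Int) 1).filter (fun j => pvCond l (l.length : Int) j)).map
        (fun j => PySem.List.pyGetD l j "")) ↔ (v ∈ l ∧ l.count v = 1) := by
  simp only [List.mem_map, List.mem_filter, PySem.List.mem_pyRange_one]
  constructor
  · rintro ⟨j, ⟨⟨hj0, hjm⟩, hcond⟩, hv⟩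
    obtain ⟨jn, rfl⟩ : ∃ jn : ℕ, ((jn : ℕ) : Int) = j := ⟨j.toNat, Int.toNat_of_nonneg hj0⟩
    have hjn : jn < l.length := by exact_mod_cast hjm
    rw [PySem.List.pyGetD_natCast, List.getD_eq_getElem l "" hjn] at hv
    have hcnt : l.count l[jn] = 1 :=
      (pv_sorted_count_one l hs jn hjn).mp ((pv_cond_iff l jn hjn).mp hcond)
    exact ⟨hv ▸ List.getElem_mem hjn, hv ▸ hcnt⟩
  · rintro ⟨hvl, hc⟩
    obtain ⟨jn, hjn, hv⟩ := List.mem_iff_getElem.mp hvl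
    refine ⟨(jn : Int), ⟨⟨by omega, by exact_mod_cast hjn⟩, ?_⟩, ?_⟩
    · exact (pv_cond_iff l jn hjn).mpr ((pv_sorted_count_one l hs jn hjn).mpr (hv ▸ hc))
    · rw [PySem.List.pyGetD_natCast, List.getD_eq_getElem l "" hjn]; exact hv

-- ===== VERDICT (by name: the statement is the Claim_ definition above) =====
theorem obtener_subsecuencias_unicas_spec : Claim_equal_obtener_subsecuencias_unicas := by
  intro secuencia n _
  show obtener_subsecuencias_unicas secuencia n = obtener_subsecuencias_unicas_alt secuencia n
  simp only [obtener_subsecuencias_unicas, obtener_subsecuencias_unicas_alt]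
  rw [← List.foldl_map (g := pvStepA)
        (f := fun i => PySem.Str.slice secuencia (some i) (some (i + n)))]
  set xs := (PySem.List.pyRange 0 (PySem.Str.len secuencia - n + 1) 1).map
    (fun i => PySem.Str.slice secuencia (some i) (some (i + n))) with hxs
  set l := xs.mergeSort (fun a b => a ≤ b) with hl
  have hs : l.Pairwise (· ≤ ·) :=
    (List.pairwise_mergeSort (le := fun a b : String => decide (a ≤ b))
      (fun a b c hab hbc => by simp at hab hbc ⊢; exact le_trans hab hbc)
      (fun a b => by simp [le_total]) xs).imp (fun h => by simpa using h)
  have hperm : l.Perm xs := List.mergeSort_perm xs _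
  rw [pv_A_side]
  have hmem : ∀ v, (PySem.Set.contains (PySem.Set.ofList
      (((PySem.List.pyRange 0 (l.length : Int) 1).filter (fun j => pvCond l (l.length : Int) j)).map
        (fun j => PySem.List.pyGetD l j ""))) v = true) ↔ (v ∈ xs ∧ xs.count v = 1) := by
    intro v
    rw [PySem.Set.contains_iff, PySem.Set.mem_ofList, pv_scan_mem l hs v,
      hperm.mem_iff, hperm.count_eq]
  have hfilt : xs.filter (fun v => PySem.Set.contains (PySem.Set.ofList
      (((PySem.List.pyRange 0 (l.length : Int) 1).filter (fun j => pvCond l (l.length : Int) j)).map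
        (fun j => PySem.List.pyGetD l j ""))) v)
      = xs.filter (fun v => xs.count v == 1) := by
    apply List.filter_congr
    intro a ha
    by_cases hc : xs.count a = 1
    · rw [(hmem a).mpr ⟨ha, hc⟩]
      simp [hc]
    · have hfalse : PySem.Set.contains (PySem.Set.ofList
          (((PySem.List.pyRange 0 (l.length : Int) 1).filter (fun j => pvCond l (l.length : Int) j)).map
            (fun j => PySem.List.pyGetD l j ""))) a = false := by
        by_cases h : PySem.Set.contains (PySem.Set.ofList
            (((PySem.List.pyRange 0 (l.length : Int) 1).filter (fun j => pvCond l (l.length : Int) j)).map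
              (fun j => PySem.List.pyGetD l j ""))) a = true
        · exact absurd ((hmem a).mp h).2 hc
        · simpa using h
      rw [hfalse]
      simp [hc]
  rw [hfilt]
  have hp : ∀ a, ((fun v => xs.count v == 1) a = true) → xs.count a ≤ 1 := by
    intro a ha
    have : xs.count a = 1 := by simpa using ha
    omega
  rw [pv_filter_ofList xs _ hp]
  refine (PySem.Set.ofList_eq_self_of_nodup _ ?_).symm
  apply List.nodup_iff_count_le_one.mpr
  intro a
  by_cases ha : a ∈ xs.filter (fun v => xs.count v == 1)
  · have h1 : xs.count a = 1 := by simpa using (List.mem_filter.mp ha).2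
    exact le_trans ((List.filter_sublist (l := xs)).count_le a) (le_of_eq h1)
  · simp [List.count_eq_zero_of_not_mem ha]
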